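-- pv_equiv track=rewrite | github.com/http-404-usernotfound/SPPU_Comp-SE_Practicals | Array.py | myIntersection3
-- ===== SOURCE A (Python) =====
-- def myIntersection3(set1, set2, set3):
--     result = []
--     for name1 in set1:
--         for name2 in set2:
--             for name3 in set3:
--                 if name1 == name2 and name2 == name3 and name1 == name3:
--                     result.append(name1)
--     return result
-- ===== SOURCE B (Python) =====
-- def myIntersection3(set1, set2, set3):
--     c2 = {}
--     for x in set2:
--         c2[x] = c2.get(x, 0) + 1
--     c3 = {}
--     for x in set3:
--         c3[x] = c3.get(x, 0) + 1
--     result = []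
--     for x in set1:
--         result += [x] * (c2.get(x, 0) * c3.get(x, 0))
--     return result
-- ===== Notes on version B (the rewrite author's own statement) =====
-- stated objective: alternative
-- what changed: Replaces the triple nested scan with two counting dicts of set2 and set3 built once, then a single pass over set1 appending each element count2(x)*count3(x) times (measured ~3x at n=256; on duplicate-heavy inputs the output itself is cubic, so the largest size finished for neither).
import Mathlib
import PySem

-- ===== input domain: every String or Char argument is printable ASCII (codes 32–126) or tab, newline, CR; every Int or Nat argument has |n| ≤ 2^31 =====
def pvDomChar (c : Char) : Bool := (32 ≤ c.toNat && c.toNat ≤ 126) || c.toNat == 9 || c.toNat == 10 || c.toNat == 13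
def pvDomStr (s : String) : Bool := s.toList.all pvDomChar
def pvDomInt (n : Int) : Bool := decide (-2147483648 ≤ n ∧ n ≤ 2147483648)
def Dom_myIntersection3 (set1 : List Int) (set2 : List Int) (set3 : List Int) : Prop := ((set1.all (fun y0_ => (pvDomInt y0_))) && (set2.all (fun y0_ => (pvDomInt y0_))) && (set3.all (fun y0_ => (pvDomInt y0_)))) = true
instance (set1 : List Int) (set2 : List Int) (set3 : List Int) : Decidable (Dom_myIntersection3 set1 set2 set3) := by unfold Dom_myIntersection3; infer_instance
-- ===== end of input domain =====

-- B replaces A's triple nested scan by two counting dicts and one pass over set1 (same result, different algorithm).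
-- ===== PORT A =====
def myIntersection3 (set1 : List Int) (set2 : List Int) (set3 : List Int) : List Int :=
  set1.foldl (fun r1 name1 =>
    set2.foldl (fun r2 name2 =>
      set3.foldl (fun r3 name3 =>
        if name1 == name2 && name2 == name3 && name1 == name3 then r3 ++ [name1] else r3)
        r2) r1) []

-- ===== PORT B =====
def myIntersection3_alt (set1 : List Int) (set2 : List Int) (set3 : List Int) : List Int :=
  let c2 := set2.foldl (fun d x => d.insert x (d.getD x 0 + 1)) (PySem.Dict.empty : PySem.Dict Int Int)
  let c3 := set3.foldl (fun d x => d.insert x (d.getD x 0 + 1)) (PySem.Dict.empty : PySem.Dict Int Int)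
  set1.foldl (fun r x => r ++ List.replicate ((c2.getD x 0 * c3.getD x 0).toNat) x) []

-- ===== PRECONDITION & SPEC =====
def Spec_myIntersection3 (set1 : List Int) (set2 : List Int) (set3 : List Int) (out : List Int) : Prop := out = myIntersection3_alt set1 set2 set3
instance (set1 : List Int) (set2 : List Int) (set3 : List Int) (out : List Int) : Decidable (Spec_myIntersection3 set1 set2 set3 out) := by unfold Spec_myIntersection3; infer_instance

-- ===== CLAIM (what is proved, stated in full; the proofs are below) =====
def Claim_equal_myIntersection3 : Prop := ∀ (set1 : List Int) (set2 : List Int) (set3 : List Int), Dom_myIntersection3 set1 set2 set3 → Spec_myIntersection3 set1 set2 set3 (myIntersection3 set1 set2 set3)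

-- ===== LEMMAS AND PROOFS =====

-- ===== VERDICT (by name: the statement is the Claim_ definition above) =====
-- innermost loop of A, for fixed name1 = x and name2 = h
theorem inner3_eq (x h : Int) (s3 : List Int) (r : List Int) :
    s3.foldl (fun r3 n3 => if x == h && h == n3 && x == n3 then r3 ++ [x] else r3) r
      = r ++ List.replicate (if x = h then s3.count x else 0) x := by
  induction s3 generalizing r with
  | nil => simp
  | cons h3 t3 ih =>
    simp only [List.foldl_cons, List.count_cons]
    by_cases hxh : x = h
    · subst hxh
      by_cases h3x : x = h3
      · subst h3x
        rw [if_pos (by simp)]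
        rw [ih]
        simp [List.replicate_succ, List.append_assoc]
      · rw [if_neg (by simp [h3x])]
        rw [ih]
        simp [Ne.symm h3x]
    · rw [if_neg (by simp [hxh])]
      rw [ih]
      simp [hxh]

-- middle loop of A over s2 with the innermost loop over s3
theorem inner2_eq (x : Int) (s2 s3 : List Int) (r : List Int) :
    s2.foldl (fun r2 n2 =>
      s3.foldl (fun r3 n3 => if x == n2 && n2 == n3 && x == n3 then r3 ++ [x] else r3) r2) r
      = r ++ List.replicate (s2.count x * s3.count x) x := by
  induction s2 generalizing r with
  | nil => simp
  | cons h t ih =>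
    simp only [List.foldl_cons, List.count_cons]
    rw [inner3_eq, ih]
    by_cases hx : x = h
    · subst hx
      rw [if_pos rfl, List.append_assoc, ← List.replicate_add]
      congr 2
      simp only [beq_self_eq_true, if_true]
      ring
    · simp [hx, Ne.symm hx]

theorem counter_getD (l : List Int) (v : Int) :
    ((l.foldl (fun d x => d.insert x (d.getD x 0 + 1)) (PySem.Dict.empty : PySem.Dict Int Int)).getD v 0)
      = (l.count v : Int) := by
  rw [PySem.Dict.getD_foldl_insert_add_one]
  simp [PySem.Dict.empty]
  rfl

theorem myIntersection3_spec : Claim_equal_myIntersection3 := by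
  intro set1 set2 set3 hd
  clear hd
  unfold Spec_myIntersection3 myIntersection3 myIntersection3_alt
  simp only []
  -- both sides are folds over set1; prove equality with a generalized accumulator
  suffices h : ∀ r : List Int,
      set1.foldl (fun r1 name1 =>
        set2.foldl (fun r2 name2 =>
          set3.foldl (fun r3 name3 =>
            if name1 == name2 && name2 == name3 && name1 == name3 then r3 ++ [name1] else r3)
            r2) r1) r
      = set1.foldl (fun r x => r ++ List.replicate
          (((set2.foldl (fun d x => d.insert x (d.getD x 0 + 1)) (PySem.Dict.empty : PySem.Dict Int Int)).getD x 0 *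
            (set3.foldl (fun d x => d.insert x (d.getD x 0 + 1)) (PySem.Dict.empty : PySem.Dict Int Int)).getD x 0).toNat) x) r by
    exact h []
  intro r
  induction set1 generalizing r with
  | nil => rfl
  | cons h1 t1 ih =>
    simp only [List.foldl_cons]
    rw [inner2_eq, counter_getD, counter_getD, ← Nat.cast_mul, Int.toNat_natCast, ih]
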